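-- pv_equiv track=rewrite | github.com/datacommonsorg/data | scripts/us_census/acs5yr/subject_tables/common/subject_tables_partial_code/subject_tables_import/common_util.py | column_to_be_ignored
-- ===== SOURCE A (Python) =====
-- def token_in_list_ignore_case(token: str, list_check: list) -> bool:
--   for tok in list_check:
--     if tok.lower() == token.lower():
--       return True
--   return False
--
-- def column_to_be_ignored(column_name: str,
--                          spec_dict: dict,
--                          delimiter: str = '!!') -> bool:
--   ret_value = False
--   if 'ignoreColumns' in spec_dict:
--     for ignore_token in spec_dict['ignoreColumns']:
--       if delimiter in ignore_token and ignore_token == column_name: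
--         ret_value = True
--       elif token_in_list_ignore_case(ignore_token,
--                                      column_name.split(delimiter)):
--         ret_value = True
--   return ret_value
-- ===== SOURCE B (Python) =====
-- def column_to_be_ignored(column_name: str,
--                          spec_dict: dict,
--                          delimiter: str = '!!') -> bool:
--   ignore = spec_dict.get('ignoreColumns', [])
--   if not ignore:
--     return False
--   if any(it == column_name and delimiter in it for it in ignore):
--     return True
--   # sort-and-merge intersection: a case-insensitive token match exists iff the
--   # sorted lowered ignore tokens and sorted lowered column pieces share an element
--   a = sorted(it.lower() for it in ignore)
--   b = sorted(p.lower() for p in column_name.split(delimiter))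
--   i = j = 0
--   while i < len(a) and j < len(b):
--     if a[i] == b[j]:
--       return True
--     if a[i] < b[j]:
--       i += 1
--     else:
--       j += 1
--   return False
-- ===== Notes on version B (the rewrite author's own statement) =====
-- stated objective: alternative
-- what changed: A's nested loop (every ignore token rescanned against every split piece via token_in_list_ignore_case) is replaced by an early any() pass for the exact full-name match followed by a sort-and-merge intersection: both the lowered ignore tokens and the lowered column pieces are sorted and a two-pointer merge detects a common element.
import Mathlib
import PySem

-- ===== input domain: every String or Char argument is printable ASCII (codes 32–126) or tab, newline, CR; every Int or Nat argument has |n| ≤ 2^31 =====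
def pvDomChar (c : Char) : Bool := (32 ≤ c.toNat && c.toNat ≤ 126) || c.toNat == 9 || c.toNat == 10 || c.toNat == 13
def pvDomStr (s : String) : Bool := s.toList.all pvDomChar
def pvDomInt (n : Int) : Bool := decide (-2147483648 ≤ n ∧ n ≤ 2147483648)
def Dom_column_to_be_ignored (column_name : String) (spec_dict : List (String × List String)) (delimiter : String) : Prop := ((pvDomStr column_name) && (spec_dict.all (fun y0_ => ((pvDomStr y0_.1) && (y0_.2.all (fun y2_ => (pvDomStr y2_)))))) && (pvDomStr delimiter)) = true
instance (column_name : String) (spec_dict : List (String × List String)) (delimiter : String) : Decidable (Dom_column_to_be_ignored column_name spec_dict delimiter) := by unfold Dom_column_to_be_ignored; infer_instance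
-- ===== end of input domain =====

-- B replaces A's nested rescanning loop by an early full-name pass and then a sort-and-merge
-- intersection of the lowered ignore tokens with the lowered column pieces (alternative algorithm).

-- ===== PORT A =====
def token_in_list_ignore_case (token : String) (list_check : List String) : Bool :=
  list_check.any (fun tok => PySem.Str.lower tok == PySem.Str.lower token)

def column_to_be_ignored (column_name : String) (spec_dict : List (String × List String)) (delimiter : String) : Bool :=
  let ret_value := false
  match PySem.Dict.get? (PySem.Dict.mk spec_dict) "ignoreColumns" with
  | none => ret_value
  | some cols =>
      cols.foldl (fun ret_value ignore_token =>
        if PySem.Str.isIn delimiter ignore_token && ignore_token == column_name then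
          true
        else if token_in_list_ignore_case ignore_token
                  ((PySem.Str.split? column_name delimiter).getD []) then
          true
        else ret_value) ret_value

-- ===== PORT B =====
-- the two-pointer while loop of Source B, as the obvious recursion over the unread suffixes
-- (strings are compared as their char lists, per the PySem convention; Python's string
-- order is exactly the lexicographic order on the char lists)
def pvSortedMerge : List (List Char) → List (List Char) → Bool
  | x :: xs, y :: ys =>
      if x = y then true
      else if x < y then pvSortedMerge xs (y :: ys)
      else pvSortedMerge (x :: xs) ys
  | _, _ => false

def column_to_be_ignored_alt (column_name : String) (spec_dict : List (String × List String)) (delimiter : String) : Bool :=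
  let ignore := PySem.Dict.getD (PySem.Dict.mk spec_dict) "ignoreColumns" []
  if ignore.isEmpty then false
  else if ignore.any (fun it => it == column_name && PySem.Str.isIn delimiter it) then true
  else
    let a := PySem.List.sorted (ignore.map (fun it => PySem.Chars.lower it.toList)) (fun x => x) false
    let b := PySem.List.sorted (((PySem.Str.split? column_name delimiter).getD []).map
               (fun p => PySem.Chars.lower p.toList)) (fun x => x) false
    pvSortedMerge a b

-- ===== PRECONDITION & SPEC =====
-- Pre_ excludes exactly the inputs on which A raises ValueError: an empty delimiter together with an
-- 'ignoreColumns' entry containing a token different from column_name reaches column_name.split(''), which raises.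
def Pre_column_to_be_ignored (column_name : String) (spec_dict : List (String × List String)) (delimiter : String) : Prop :=
  delimiter ≠ "" ∨ ((PySem.Dict.get? (PySem.Dict.mk spec_dict) "ignoreColumns").getD []).all (fun t => t == column_name) = true
instance (column_name : String) (spec_dict : List (String × List String)) (delimiter : String) : Decidable (Pre_column_to_be_ignored column_name spec_dict delimiter) := by unfold Pre_column_to_be_ignored; infer_instance

def pvWitness_column_to_be_ignored : String × (List (String × List String)) × String :=
  ("Total!!Households", [("ignoreColumns", ["households", "Total!!Foo"])], "!!")

def Spec_column_to_be_ignored (column_name : String) (spec_dict : List (String × List String)) (delimiter : String) (out : Bool) : Prop := out = column_to_be_ignored_alt column_name spec_dict delimiter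
instance (column_name : String) (spec_dict : List (String × List String)) (delimiter : String) (out : Bool) : Decidable (Spec_column_to_be_ignored column_name spec_dict delimiter out) := by unfold Spec_column_to_be_ignored; infer_instance

-- ===== CLAIM (what is proved, stated in full; the proofs are below) =====
def Claim_equal_column_to_be_ignored : Prop := ∀ (column_name : String) (spec_dict : List (String × List String)) (delimiter : String), Dom_column_to_be_ignored column_name spec_dict delimiter → Pre_column_to_be_ignored column_name spec_dict delimiter → Spec_column_to_be_ignored column_name spec_dict delimiter (column_to_be_ignored column_name spec_dict delimiter)

-- ===== LEMMAS AND PROOFS =====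

-- A's accumulator loop is an 'any' over the disjunction of its two branch conditions.
theorem pv_foldl_or (c1 c2 : String → Bool) :
    ∀ (l : List String) (acc : Bool),
      l.foldl (fun a t => if c1 t then true else if c2 t then true else a) acc
        = (acc || l.any (fun t => c1 t || c2 t)) := by
  intro l
  induction l with
  | nil => simp
  | cons x xs ih =>
      intro acc
      simp only [List.foldl_cons, List.any_cons, ih]
      by_cases h1 : c1 x = true <;> by_cases h2 : c2 x = true <;> simp [h1, h2]

-- the sort in port B, re-read with Mathlib's order instances (the orders are propositionally
-- the same; Decidable is a subsingleton), so that PySem.List.sorted_pairwise applies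
theorem pv_sorted_pairwise' (l : List (List Char)) :
    (PySem.List.sorted l (fun x => x) false).Pairwise (· ≤ ·) := by
  have h : (fun (a b : List Char) => a.decidableLT b)
      = (LinearOrder.toDecidableLT : DecidableLT (List Char)) := by
    funext a b; exact Subsingleton.elim _ _
  rw [h]
  exact PySem.List.sorted_pairwise l _

-- correctness of the two-pointer merge on sorted lists: it finds exactly a common element
theorem pvSortedMerge_iff :
    ∀ (xs ys : List (List Char)), xs.Pairwise (· ≤ ·) → ys.Pairwise (· ≤ ·) →
      (pvSortedMerge xs ys = true ↔ ∃ v, v ∈ xs ∧ v ∈ ys) := by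
  intro xs
  induction xs with
  | nil => intro ys _ _; simp [pvSortedMerge]
  | cons x xs ihx =>
      intro ys hx hy
      induction ys with
      | nil => simp [pvSortedMerge]
      | cons y ys ihy =>
          rw [pvSortedMerge]
          rcases List.pairwise_cons.mp hx with ⟨hxall, hx'⟩
          rcases List.pairwise_cons.mp hy with ⟨hyall, hy'⟩
          by_cases hxy : x = y
          · subst hxy
            simp
          · rw [if_neg hxy]
            by_cases hlt : x < y
            · rw [if_pos hlt]
              rw [ihx (y :: ys) hx' hy]
              constructor
              · rintro ⟨v, hv1, hv2⟩; exact ⟨v, List.mem_cons_of_mem _ hv1, hv2⟩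
              · rintro ⟨v, hv1, hv2⟩
                rcases List.mem_cons.mp hv1 with rfl | hv1
                · -- v = x cannot be in y :: ys: everything there is ≥ y > x
                  exfalso
                  rcases List.mem_cons.mp hv2 with rfl | hv2
                  · exact hxy rfl
                  · exact absurd (lt_of_lt_of_le hlt (hyall v hv2)) (lt_irrefl v)
                · exact ⟨v, hv1, hv2⟩
            · rw [if_neg hlt]
              have hyx : y < x := by
                rcases lt_trichotomy x y with h | h | h
                · exact absurd h hlt
                · exact absurd h hxy
                · exact h
              rw [ihy hy']
              constructor
              · rintro ⟨v, hv1, hv2⟩; exact ⟨v, hv1, List.mem_cons_of_mem _ hv2⟩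
              · rintro ⟨v, hv1, hv2⟩
                rcases List.mem_cons.mp hv2 with rfl | hv2
                · exfalso
                  rcases List.mem_cons.mp hv1 with rfl | hv1
                  · exact hxy rfl
                  · exact absurd (lt_of_lt_of_le hyx (hxall v hv1)) (lt_irrefl v)
                · exact ⟨v, hv1, hv2⟩

-- case-insensitive equality of strings is equality of their lowered char lists
theorem pv_lower_beq (p t : String) :
    (PySem.Str.lower p == PySem.Str.lower t) = true ↔
      PySem.Chars.lower p.toList = PySem.Chars.lower t.toList := by
  rw [beq_iff_eq]
  constructor
  · intro h
    have := congrArg String.toList h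
    simpa using this
  · intro h
    apply String.ext
    have h1 : (PySem.Str.lower p).toList = (PySem.Str.lower t).toList := by simpa using h
    simpa [String.toList] using h1

theorem column_to_be_ignored_eq_alt (column_name : String)
    (spec_dict : List (String × List String)) (delimiter : String) :
    column_to_be_ignored column_name spec_dict delimiter
      = column_to_be_ignored_alt column_name spec_dict delimiter := by
  unfold column_to_be_ignored column_to_be_ignored_alt token_in_list_ignore_case
  rw [PySem.Dict.getD_eq_get?_getD]
  cases hg : PySem.Dict.get? (PySem.Dict.mk spec_dict) "ignoreColumns" with
  | none => simp
  | some cols =>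
      simp only [Option.getD_some, pv_foldl_or, Bool.false_or]
      set pieces := (PySem.Str.split? column_name delimiter).getD [] with hpieces
      by_cases hnil : cols.isEmpty
      · rw [List.isEmpty_iff] at hnil
        subst hnil
        simp
      · rw [if_neg (by simp [hnil])]
        by_cases hex : cols.any (fun it => it == column_name && PySem.Str.isIn delimiter it)
        · rw [if_pos hex]
          obtain ⟨t, ht, hcond⟩ := List.any_eq_true.mp hex
          rw [Bool.and_eq_true] at hcond
          refine List.any_eq_true.mpr ⟨t, ht, ?_⟩
          simp only [Bool.or_eq_true, Bool.and_eq_true]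
          exact Or.inl ⟨hcond.2, hcond.1⟩
        · rw [if_neg hex]
          apply Bool.eq_iff_iff.mpr
          constructor
          · intro h
            refine (pvSortedMerge_iff _ _
              (pv_sorted_pairwise' _) (pv_sorted_pairwise' _)).mpr ?_
            obtain ⟨t, ht, hcond⟩ := List.any_eq_true.mp h
            simp only [Bool.or_eq_true] at hcond
            rcases hcond with h1 | h2
            · -- the exact-match branch cannot fire: hex says no token satisfies it
              exfalso
              rw [Bool.and_eq_true] at h1
              exact hex (List.any_eq_true.mpr ⟨t, ht, by
                rw [Bool.and_eq_true]; exact ⟨h1.2, h1.1⟩⟩)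
            · obtain ⟨p, hp, hlow⟩ := List.any_eq_true.mp h2
              refine ⟨PySem.Chars.lower t.toList, ?_, ?_⟩
              · rw [PySem.List.mem_sorted]
                exact List.mem_map.mpr ⟨t, ht, rfl⟩
              · rw [PySem.List.mem_sorted]
                exact List.mem_map.mpr ⟨p, hp, (pv_lower_beq p t).mp hlow⟩
          · intro h
            obtain ⟨v, hv1, hv2⟩ := (pvSortedMerge_iff _ _
              (pv_sorted_pairwise' _) (pv_sorted_pairwise' _)).mp h
            rw [PySem.List.mem_sorted] at hv1 hv2
            obtain ⟨t, ht, hvt⟩ := List.mem_map.mp hv1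
            obtain ⟨p, hp, hvp⟩ := List.mem_map.mp hv2
            refine List.any_eq_true.mpr ⟨t, ht, ?_⟩
            simp only [Bool.or_eq_true]
            refine Or.inr ?_
            refine List.any_eq_true.mpr ⟨p, hp, ?_⟩
            exact (pv_lower_beq p t).mpr (hvp.trans hvt.symm)

-- ===== VERDICT (by name: the statement is the Claim_ definition above) =====
theorem column_to_be_ignored_spec : Claim_equal_column_to_be_ignored := by
  intro column_name spec_dict delimiter _ _
  unfold Spec_column_to_be_ignored
  exact column_to_be_ignored_eq_alt column_name spec_dict delimiter
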